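-- pv_equiv track=rewrite | github.com/xavierskip/oa-spider | oa_spider/oa.py | pretty_match
-- ===== SOURCE A (Python) =====
-- def pretty_match(code):
--     d = {
--         'O': '0',
--         'o': '0',
--         'I': '1',
--         'i': '1',
--         'l': '1',
--         'b': '0'
--     }
--     for k in d:
--         code = code.replace(k, d[k])
--     return code
-- ===== SOURCE B (Python) =====
-- def pretty_match(code):
--     d = {
--         'O': '0',
--         'o': '0',
--         'I': '1',
--         'i': '1',
--         'l': '1',
--         'b': '0'
--     }
--     return ''.join(d.get(c, c) for c in code)
-- ===== Notes on version B (the rewrite author's own statement) =====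
-- stated objective: alternative
-- what changed: Instead of six sequential full-string .replace passes over the dict's keys, B makes one pass over the input's characters and joins d.get(c, c); this is exact because keys are distinct single characters and no replacement output is a key, so replaces never chain.
import Mathlib
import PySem

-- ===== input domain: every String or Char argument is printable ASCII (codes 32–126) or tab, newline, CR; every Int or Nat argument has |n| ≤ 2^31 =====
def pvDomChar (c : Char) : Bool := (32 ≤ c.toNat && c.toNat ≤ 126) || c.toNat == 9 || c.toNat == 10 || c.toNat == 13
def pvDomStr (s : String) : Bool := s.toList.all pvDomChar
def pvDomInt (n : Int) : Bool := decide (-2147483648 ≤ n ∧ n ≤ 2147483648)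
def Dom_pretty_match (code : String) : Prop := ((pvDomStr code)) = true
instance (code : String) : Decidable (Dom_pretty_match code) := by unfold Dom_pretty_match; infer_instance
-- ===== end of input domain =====

-- B replaces six sequential full-string .replace passes with one pass over the
-- characters joining d.get(c, c); objective: alternative (different decomposition).


-- ===== PORT A =====
-- the dict literal, as an association list in insertion order
def pmDictA : List (String × String) :=
  [("O", "0"), ("o", "0"), ("I", "1"), ("i", "1"), ("l", "1"), ("b", "0")]

-- `for k in d: code = code.replace(k, d[k])`
def pretty_match (code : String) : String :=
  pmDictA.foldl (fun code kv => PySem.Str.replace code kv.1 kv.2) code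

-- ===== PORT B =====
def pmDictB : PySem.Dict Char Char :=
  PySem.Dict.ofList [('O', '0'), ('o', '0'), ('I', '1'), ('i', '1'), ('l', '1'), ('b', '0')]

-- `''.join(d.get(c, c) for c in code)`
def pretty_match_alt (code : String) : String :=
  String.ofList (code.toList.map (fun c => pmDictB.getD c c))

-- ===== PRECONDITION & SPEC =====
def Spec_pretty_match (code : String) (out : String) : Prop := out = pretty_match_alt code
instance (code : String) (out : String) : Decidable (Spec_pretty_match code out) := by unfold Spec_pretty_match; infer_instance

-- ===== CLAIM (what is proved, stated in full; the proofs are below) =====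
def Claim_equal_pretty_match : Prop := ∀ (code : String), Dom_pretty_match code → Spec_pretty_match code (pretty_match code)

-- ===== LEMMAS AND PROOFS =====

-- replacing a single character by a single character is a per-character map
theorem replace_go_single (a b : Char) :
    ∀ (fuel : Nat) (l acc : List Char), l.length ≤ fuel →
      PySem.Chars.replace.go [a] [b] fuel l acc
        = acc.reverse ++ l.map (fun c => if c = a then b else c) := by
  intro fuel
  induction fuel with
  | zero =>
    intro l acc h
    have : l = [] := List.length_eq_zero_iff.mp (Nat.le_zero.mp h)
    subst this; simp [PySem.Chars.replace.go]
  | succ n ih =>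
    intro l acc h
    cases l with
    | nil => simp [PySem.Chars.replace.go]
    | cons c t =>
      simp only [PySem.Chars.replace.go]
      by_cases hc : c = a
      · subst hc
        have hp : List.isPrefixOf [c] (c :: t) = true := by simp [List.isPrefixOf]
        rw [if_pos hp]
        have := ih t ([b] ++ acc) (by simpa using Nat.lt_succ_iff.mp (by simpa using h))
        simpa using this
      · have hp : List.isPrefixOf [a] (c :: t) = false := by
          simp [List.isPrefixOf]; exact fun h' => (hc h'.symm).elim
        rw [if_neg (by simp [hp])]
        have := ih t (c :: acc) (by simpa using Nat.lt_succ_iff.mp (by simpa using h))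
        simpa [hc] using this

theorem replace_single (a b : Char) (s : List Char) :
    PySem.Chars.replace s [a] [b] = s.map (fun c => if c = a then b else c) := by
  simp only [PySem.Chars.replace, List.isEmpty_cons, Bool.false_eq_true, if_false]
  simpa using replace_go_single a b s.length s [] (le_refl _)

theorem pointwise (c : Char) :
    (fun x => if x = 'b' then '0' else x)
      ((fun x => if x = 'l' then '1' else x)
        ((fun x => if x = 'i' then '1' else x)
          ((fun x => if x = 'I' then '1' else x)
            ((fun x => if x = 'o' then '0' else x)
              ((fun x => if x = 'O' then '0' else x) c)))))
      = pmDictB.getD c c := by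
  have e : pmDictB = ((((((PySem.Dict.empty.insert 'O' '0').insert 'o' '0').insert 'I' '1').insert 'i' '1').insert 'l' '1').insert 'b' '0') := by rfl
  rw [e]
  by_cases h1 : c = 'O' <;> by_cases h2 : c = 'o' <;> by_cases h3 : c = 'I' <;>
    by_cases h4 : c = 'i' <;> by_cases h5 : c = 'l' <;> by_cases h6 : c = 'b' <;>
    simp_all [PySem.Dict.getD_insert_self, PySem.Dict.getD_insert_of_ne]

theorem chain_map (l : List Char) :
    List.map (fun x => if x = 'b' then '0' else x)
      (List.map (fun x => if x = 'l' then '1' else x)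
        (List.map (fun x => if x = 'i' then '1' else x)
          (List.map (fun x => if x = 'I' then '1' else x)
            (List.map (fun x => if x = 'o' then '0' else x)
              (List.map (fun x => if x = 'O' then '0' else x) l)))))
      = List.map (fun c => pmDictB.getD c c) l := by
  induction l with
  | nil => rfl
  | cons c t ih =>
    simp only [List.map_cons, ih, List.cons.injEq]
    exact ⟨pointwise c, trivial⟩

-- ===== VERDICT (by name: the statement is the Claim_ definition above) =====
theorem pretty_match_spec : Claim_equal_pretty_match := by
  intro code _
  unfold Spec_pretty_match pretty_match pretty_match_alt pmDictA
  rw [← String.toList_inj]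
  simp only [List.foldl, PySem.Str.toList_replace, String.toList_ofList]
  simp only [show ("O":String).toList = ['O'] from by simp, show ("o":String).toList = ['o'] from by simp,
    show ("I":String).toList = ['I'] from by simp, show ("i":String).toList = ['i'] from by simp,
    show ("l":String).toList = ['l'] from by simp, show ("b":String).toList = ['b'] from by simp,
    show ("0":String).toList = ['0'] from by simp, show ("1":String).toList = ['1'] from by simp,
    replace_single]
  exact chain_map code.toList
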